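-- pv_equiv track=rewrite | github.com/alvanieto/coding_challenge | hackerrank/alternating_characters.py | alternatingCharacters
-- ===== SOURCE A (Python) =====
-- def alternatingCharacters(s):
--     prev_char = ''
--     count = 0
--     for char_ in s:
--         if prev_char and prev_char == char_:
--             count += 1
--         prev_char = char_
--     return count
-- ===== SOURCE B (Python) =====
-- def alternatingCharacters(s):
--     # Run-length view: answer = len(s) - number of maximal runs of equal chars.
--     chars = list(s)
--     runs = 0
--     while chars:
--         runs += 1
--         head = chars[0]
--         i = 0
--         while i < len(chars) and chars[i] == head:
--             i += 1
--         chars = chars[i:]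
--     return len(s) - runs
-- ===== Notes on version B (the rewrite author's own statement) =====
-- stated objective: alternative
-- what changed: Replaces the prev_char stateful scan with a run-length decomposition: repeatedly strip the maximal run of equal leading characters, count the runs, and return len(s) minus the run count.
import Mathlib
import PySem

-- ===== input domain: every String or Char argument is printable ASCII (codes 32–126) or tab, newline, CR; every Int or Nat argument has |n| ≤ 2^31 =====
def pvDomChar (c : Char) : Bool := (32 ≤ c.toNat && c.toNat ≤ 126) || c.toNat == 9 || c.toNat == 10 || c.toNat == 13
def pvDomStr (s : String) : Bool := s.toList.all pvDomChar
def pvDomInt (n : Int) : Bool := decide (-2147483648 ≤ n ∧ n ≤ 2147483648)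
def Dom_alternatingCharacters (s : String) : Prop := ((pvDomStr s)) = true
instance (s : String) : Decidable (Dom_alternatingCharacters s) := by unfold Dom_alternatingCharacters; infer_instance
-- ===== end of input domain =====

-- B re-implements the count as len(s) minus the number of maximal runs of equal characters (run-length view); same O(n) cost, different decomposition.

-- ===== PORT A =====
-- A's loop: prev_char starts as '' (here: none), count += 1 when prev_char and prev_char == char_.
def pvGoA (prev : Option Char) (count : Int) (l : List Char) : Int :=
  match l with
  | [] => count
  | c :: t =>
      pvGoA (some c)
        (if (match prev with | some p => p == c | none => false) then count + 1 else count) t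

def alternatingCharacters (s : String) : Int := pvGoA none 0 s.toList

-- ===== PORT B =====
-- B's outer while loop: strip the maximal equal-character run from the front, count runs.
def pvRunCount (l : List Char) : Int :=
  match l with
  | [] => 0
  | a :: t => 1 + pvRunCount (t.dropWhile (fun c => c == a))
termination_by l.length
decreasing_by
  exact Nat.lt_succ_of_le (List.length_dropWhile_le _ _)

def alternatingCharacters_alt (s : String) : Int :=
  (s.toList.length : Int) - pvRunCount s.toList

-- ===== PRECONDITION & SPEC =====
def Spec_alternatingCharacters (s : String) (out : Int) : Prop := out = alternatingCharacters_alt s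
instance (s : String) (out : Int) : Decidable (Spec_alternatingCharacters s out) := by unfold Spec_alternatingCharacters; infer_instance

-- ===== CLAIM (what is proved, stated in full; the proofs are below) =====
def Claim_equal_alternatingCharacters : Prop := ∀ (s : String), Dom_alternatingCharacters s → Spec_alternatingCharacters s (alternatingCharacters s)

-- ===== LEMMAS AND PROOFS =====

-- number of adjacent equal pairs, given the previous character (A's invariant)
def pvPairsEq (prev : Option Char) (l : List Char) : Int :=
  match l with
  | [] => 0
  | c :: t =>
      (if (match prev with | some p => p == c | none => false) then 1 else 0) + pvPairsEq (some c) t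

lemma pvGoA_eq (l : List Char) : ∀ prev count, pvGoA prev count l = count + pvPairsEq prev l := by
  induction l with
  | nil => intro prev count; simp [pvGoA, pvPairsEq]
  | cons c t ih =>
      intro prev count
      cases prev with
      | none => simp [pvGoA, pvPairsEq, ih]
      | some p =>
          by_cases h : p = c <;> simp [pvGoA, pvPairsEq, ih, h] <;> ring

lemma pvPairsEq_run (t : List Char) : ∀ a : Char,
    pvPairsEq (some a) t
      = ((t.takeWhile (fun c => c == a)).length : Int) + pvPairsEq none (t.dropWhile (fun c => c == a)) := by
  induction t with
  | nil => intro a; simp [pvPairsEq]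
  | cons b t' ih =>
      intro a
      by_cases h : b = a
      · subst h
        simp only [pvPairsEq, List.takeWhile, List.dropWhile, BEq.rfl, if_true]
        rw [ih b]
        simp only [List.length_cons]
        push_cast
        ring
      · have hb : (b == a) = false := by simp [h]
        simp [pvPairsEq, List.takeWhile, List.dropWhile, hb]
        exact fun e => h e.symm

lemma pvRunCount_key : ∀ n : Nat, ∀ l : List Char, l.length ≤ n →
    pvRunCount l + pvPairsEq none l = (l.length : Int) := by
  intro n
  induction n with
  | zero =>
      intro l h
      have : l = [] := List.eq_nil_of_length_eq_zero (Nat.le_zero.mp h)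
      subst this; simp [pvRunCount, pvPairsEq]
  | succ n ih =>
      intro l h
      match l with
      | [] => simp [pvRunCount, pvPairsEq]
      | a :: t =>
          have ht : t.length ≤ n := Nat.le_of_succ_le_succ h
          have hd : (t.dropWhile (fun c => c == a)).length ≤ n :=
            le_trans (List.length_dropWhile_le _ _) ht
          have ihd := ih _ hd
          have hsplit : (t.takeWhile (fun c => c == a)).length
              + (t.dropWhile (fun c => c == a)).length = t.length := by
            rw [← List.length_append, List.takeWhile_append_dropWhile]
          rw [pvRunCount]
          rw [show pvPairsEq none (a :: t) = pvPairsEq (some a) t by simp [pvPairsEq]]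
          rw [pvPairsEq_run t a]
          have : pvRunCount (t.dropWhile (fun c => c == a))
              = ((t.dropWhile (fun c => c == a)).length : Int)
                - pvPairsEq none (t.dropWhile (fun c => c == a)) := by omega
          rw [this]
          simp only [List.length_cons]
          push_cast
          omega

-- ===== VERDICT (by name: the statement is the Claim_ definition above) =====
theorem alternatingCharacters_spec : Claim_equal_alternatingCharacters := by
  intro s _
  unfold Spec_alternatingCharacters alternatingCharacters alternatingCharacters_alt
  rw [pvGoA_eq]
  have := pvRunCount_key s.toList.length s.toList le_rfl
  omega
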